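-- pv_equiv track=rewrite | github.com/z3ro7706/Gist_z3ro | Code/Algorithm/Practice/MIdterm_exam/Wave Sorting.py | WaveSorting
-- ===== SOURCE A (Python) =====
-- def WaveSorting(arr:list):
--     counting_list=[]
--     for i in range(0,len(arr)):
--         count=0
--         for j in range(0,len(arr)):
--             if(arr[i]==arr[j]):
--                 count+=1
--
--         counting_list.append(count)
--
--     if(find_max(counting_list)>(len(arr)//2)):
--         return False
--     else:
--         return True
--
-- def find_max(arr:list):
--     max=arr[0]
--     for i in range(0,len(arr)):
--         if(max<=arr[i]):
--             max=arr[i]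
--     return max
-- ===== SOURCE B (Python) =====
-- def WaveSorting(arr: list):
--     # Boyer-Moore majority vote: one pass to find the only possible majority
--     # candidate, one pass to count it.  Equality-only, no hashing/sorting.
--     candidate = arr[0]
--     count = 0
--     for x in arr:
--         if count == 0:
--             candidate = x
--         if x == candidate:
--             count += 1
--         else:
--             count -= 1
--     occ = 0
--     for x in arr:
--         if x == candidate:
--             occ += 1
--     return not (occ > len(arr) // 2)
-- ===== Notes on version B (the rewrite author's own statement) =====
-- stated objective: faster
-- what changed: Replaced the quadratic count-every-element-against-every-element pass plus find_max scan with Boyer-Moore majority vote: one pass finds the only possible majority candidate, a second pass counts it.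
-- outside the precondition, e.g. on WaveSorting([]): A raises IndexError, B raises IndexError
import Mathlib
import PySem

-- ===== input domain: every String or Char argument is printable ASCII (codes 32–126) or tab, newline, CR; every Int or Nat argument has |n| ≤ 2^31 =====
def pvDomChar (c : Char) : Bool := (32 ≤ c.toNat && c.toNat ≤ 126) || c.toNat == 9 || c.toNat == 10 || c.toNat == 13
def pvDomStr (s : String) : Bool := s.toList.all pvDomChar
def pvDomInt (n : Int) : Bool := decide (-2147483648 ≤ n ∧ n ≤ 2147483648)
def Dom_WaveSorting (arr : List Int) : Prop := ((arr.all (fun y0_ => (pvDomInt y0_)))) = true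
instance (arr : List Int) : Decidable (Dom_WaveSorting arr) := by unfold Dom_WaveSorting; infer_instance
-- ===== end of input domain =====

-- B replaces A's O(n^2) per-element counting with the O(n) Boyer-Moore majority vote.

-- ===== PORT A =====
-- find_max: max=arr[0] raises IndexError on []; the [] branch is unreachable under Pre_.
def findMaxA (l : List Int) : Int :=
  match l with
  | [] => 0
  | h :: _ => l.foldl (fun m x => if m ≤ x then x else m) h

def WaveSorting (arr : List Int) : Bool :=
  -- counting_list: for each element, scan the whole list counting equal elements
  let counting := arr.map (fun a => arr.foldl (fun c b => if a = b then c + 1 else c) (0 : Int))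
  if findMaxA counting > PySem.Int.floordiv (PySem.List.len arr) 2 then false else true

-- ===== PORT B =====
def WaveSorting_alt (arr : List Int) : Bool :=
  match arr with
  | [] => true  -- unreachable under Pre_ (candidate = arr[0] raises IndexError on [])
  | a0 :: _ =>
    let s := arr.foldl (fun (p : Int × Int) x =>
        let cand := if p.2 = 0 then x else p.1
        if x = cand then (cand, p.2 + 1) else (cand, p.2 - 1)) (a0, 0)
    let occ := arr.foldl (fun (c : Int) x => if x = s.1 then c + 1 else c) (0 : Int)
    !(decide (occ > PySem.Int.floordiv (PySem.List.len arr) 2))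

-- ===== PRECONDITION & SPEC =====
-- Pre_ excludes only the empty list, on which both A (find_max) and B (arr[0]) raise IndexError.
def Pre_WaveSorting (arr : List Int) : Prop := arr ≠ []
instance (arr : List Int) : Decidable (Pre_WaveSorting arr) := by unfold Pre_WaveSorting; infer_instance
def pvWitness_WaveSorting : List Int := ([1, 2, 2])

def Spec_WaveSorting (arr : List Int) (out : Bool) : Prop := out = WaveSorting_alt arr
instance (arr : List Int) (out : Bool) : Decidable (Spec_WaveSorting arr out) := by unfold Spec_WaveSorting; infer_instance

-- ===== CLAIM (what is proved, stated in full; the proofs are below) =====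
def Claim_equal_WaveSorting : Prop := ∀ (arr : List Int), Dom_WaveSorting arr → Pre_WaveSorting arr → Spec_WaveSorting arr (WaveSorting arr)

-- ===== LEMMAS AND PROOFS =====

-- the counting fold is List.count (as an Int)
theorem foldl_cnt (x : Int) : ∀ (l : List Int) (c : Int),
    l.foldl (fun c b => if x = b then c + 1 else c) c = c + (l.count x : Int) := by
  intro l
  induction l with
  | nil => simp
  | cons a t ih =>
    intro c
    simp only [List.foldl_cons, List.count_cons, ih]
    by_cases h : x = a
    · simp only [h, BEq.rfl, if_pos]
      push_cast
      ring
    · rw [if_neg h, if_neg (by simp only [beq_iff_eq]; exact fun e => h e.symm)]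
      simp

theorem foldl_max_mem : ∀ (l : List Int) (b : Int), l.foldl max b = b ∨ l.foldl max b ∈ l := by
  intro l
  induction l with
  | nil => simp
  | cons a t ih =>
    intro b
    rw [List.foldl_cons]
    rcases ih (max b a) with h | h
    · rcases max_choice b a with hc | hc
      · left; rw [h, hc]
      · right; rw [h, hc]; exact List.mem_cons_self
    · right; exact List.mem_cons_of_mem _ h

theorem le_foldl_max' : ∀ (l : List Int) (b y : Int), y = b ∨ y ∈ l → y ≤ l.foldl max b := by
  intro l
  induction l with
  | nil =>
    rintro b y (rfl | h)
    · exact le_refl _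
    · simp at h
  | cons a t ih =>
    rintro b y (rfl | h)
    · rw [List.foldl_cons]
      exact le_trans (le_max_left y a) (ih _ _ (Or.inl rfl))
    · rcases List.mem_cons.mp h with rfl | h
      · rw [List.foldl_cons]
        exact le_trans (le_max_right b y) (ih _ _ (Or.inl rfl))
      · rw [List.foldl_cons]
        exact ih _ _ (Or.inr h)

-- A's step function is max
theorem stepA_eq_max : (fun (m x : Int) => if m ≤ x then x else m) = max := by
  funext m x; rw [max_def]

-- Boyer-Moore invariant: treating the start state (cand, cnt) as cnt virtual copies of cand,
-- every value other than the final candidate occurs at most ((len + cnt) - final count)/2 times.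
theorem bm_inv : ∀ (l : List Int) (cand cnt : Int), 0 ≤ cnt →
    0 ≤ (l.foldl (fun (p : Int × Int) x =>
        let c := if p.2 = 0 then x else p.1
        if x = c then (c, p.2 + 1) else (c, p.2 - 1)) (cand, cnt)).2 ∧
    ∀ x, x ≠ (l.foldl (fun (p : Int × Int) x =>
        let c := if p.2 = 0 then x else p.1
        if x = c then (c, p.2 + 1) else (c, p.2 - 1)) (cand, cnt)).1 →
      2 * ((l.count x : Int) + (if x = cand then cnt else 0)) ≤
        (l.length : Int) + cnt - (l.foldl (fun (p : Int × Int) x =>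
        let c := if p.2 = 0 then x else p.1
        if x = c then (c, p.2 + 1) else (c, p.2 - 1)) (cand, cnt)).2 := by
  intro l
  induction l with
  | nil => intro cand cnt h; constructor
           · simpa using h
           · intro x hx; simp [if_neg (by simpa using hx)]
  | cons a t ih =>
    intro cand cnt hcnt
    by_cases h0 : cnt = 0
    · subst h0
      have step : ((a :: t).foldl (fun (p : Int × Int) x =>
          let c := if p.2 = 0 then x else p.1
          if x = c then (c, p.2 + 1) else (c, p.2 - 1)) (cand, 0)) =
          (t.foldl (fun (p : Int × Int) x =>
          let c := if p.2 = 0 then x else p.1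
          if x = c then (c, p.2 + 1) else (c, p.2 - 1)) (a, 1)) := by simp
      rw [step]
      obtain ⟨h1, h2⟩ := ih a 1 (by omega)
      refine ⟨h1, ?_⟩
      intro x hx
      have := h2 x hx
      simp only [List.count_cons, List.length_cons, beq_iff_eq]
      by_cases hxa : x = a <;> simp [hxa] at this ⊢ <;> omega
    · by_cases ha : a = cand
      · subst ha
        have step : ((a :: t).foldl (fun (p : Int × Int) x =>
            let c := if p.2 = 0 then x else p.1
            if x = c then (c, p.2 + 1) else (c, p.2 - 1)) (a, cnt)) =
            (t.foldl (fun (p : Int × Int) x =>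
            let c := if p.2 = 0 then x else p.1
            if x = c then (c, p.2 + 1) else (c, p.2 - 1)) (a, cnt + 1)) := by
          simp [h0]
        rw [step]
        obtain ⟨h1, h2⟩ := ih a (cnt + 1) (by omega)
        refine ⟨h1, ?_⟩
        intro x hx
        have := h2 x hx
        simp only [List.count_cons, List.length_cons, beq_iff_eq]
        by_cases hxa : x = a <;> simp [hxa] at this ⊢ <;> omega
      · have step : ((a :: t).foldl (fun (p : Int × Int) x =>
            let c := if p.2 = 0 then x else p.1
            if x = c then (c, p.2 + 1) else (c, p.2 - 1)) (cand, cnt)) =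
            (t.foldl (fun (p : Int × Int) x =>
            let c := if p.2 = 0 then x else p.1
            if x = c then (c, p.2 + 1) else (c, p.2 - 1)) (cand, cnt - 1)) := by
          simp [h0, ha]
        rw [step]
        obtain ⟨h1, h2⟩ := ih cand (cnt - 1) (by omega)
        refine ⟨h1, ?_⟩
        intro x hx
        have := h2 x hx
        simp only [List.count_cons, List.length_cons, beq_iff_eq]
        by_cases hxc : x = cand
        · subst hxc
          simp [Ne.symm (fun h => ha h.symm)] at this ⊢
          omega
        · by_cases hxa : x = a <;> simp [hxa, hxc] at this ⊢ <;> omega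

theorem WaveSorting_spec : Claim_equal_WaveSorting := by
  intro arr _ hpre
  unfold Spec_WaveSorting WaveSorting WaveSorting_alt
  match arr, hpre with
  | a0 :: t, _ =>
    simp only []
    set l : List Int := a0 :: t with hl
    set s := l.foldl (fun (p : Int × Int) x =>
        let cand := if p.2 = 0 then x else p.1
        if x = cand then (cand, p.2 + 1) else (cand, p.2 - 1)) (a0, 0) with hs
    have hbm := bm_inv l a0 0 (by omega)
    rw [← hs] at hbm
    obtain ⟨hk, hx⟩ := hbm
    -- the two counts
    have hcnt : ∀ a : Int, l.foldl (fun c b => if a = b then c + 1 else c) (0 : Int) = (l.count a : Int) := by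
      intro a; rw [foldl_cnt]; ring
    -- half = len // 2
    have hhalf : PySem.Int.floordiv (PySem.List.len l) 2 = (l.length : Int) / 2 := by
      rw [PySem.List.len_eq, PySem.Int.floordiv_eq_ediv_of_pos (by omega)]
    set n : Int := (l.length : Int) with hn
    have hn1 : 1 ≤ n := by simp [hn, hl]
    -- counting list and its max
    set counting := l.map (fun a => l.foldl (fun c b => if a = b then c + 1 else c) (0 : Int)) with hcl
    have hclcons : counting = (l.foldl (fun c b => if a0 = b then c + 1 else c) (0 : Int)) ::
        t.map (fun a => l.foldl (fun c b => if a = b then c + 1 else c) (0 : Int)) := by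
      simp [hcl, hl]
    have hfm_shape : findMaxA counting =
        counting.foldl max (l.foldl (fun c b => if a0 = b then c + 1 else c) (0 : Int)) := by
      rw [hclcons]; simp only [findMaxA, stepA_eq_max]
    -- max is attained by some element's count
    have hfm_mem : ∃ a ∈ l, findMaxA counting = (l.count a : Int) := by
      rcases foldl_max_mem counting (l.foldl (fun c b => if a0 = b then c + 1 else c) (0 : Int)) with h | h
      · exact ⟨a0, by simp [hl], (hfm_shape.trans h).trans (hcnt a0)⟩
      · rcases List.mem_map.mp (hcl ▸ h) with ⟨a, hal, hae⟩
        refine ⟨a, hal, ?_⟩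
        rw [hfm_shape, ← hcnt a]
        simpa using hae.symm
    -- max dominates every element's count
    have hfm_ge : ∀ a ∈ l, (l.count a : Int) ≤ findMaxA counting := by
      intro a hal
      rw [hfm_shape]
      apply le_foldl_max'
      right
      rw [← hcnt a]
      exact hcl ▸ List.mem_map_of_mem hal
    -- occ = count of the candidate
    have hocc : l.foldl (fun (c : Int) x => if x = s.1 then c + 1 else c) (0 : Int) = (l.count s.1 : Int) := by
      have he : (fun (c : Int) x => if x = s.1 then c + 1 else c) =
          (fun (c : Int) b => if s.1 = b then c + 1 else c) := by
        funext c b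
        by_cases hb : b = s.1
        · simp [hb]
        · rw [if_neg hb, if_neg (fun e => hb e.symm)]
      rw [he, foldl_cnt]
      ring
    rw [hocc, hhalf]
    -- key equivalence: max count > n/2 ↔ count of candidate > n/2
    have key : (findMaxA counting > n / 2) ↔ ((l.count s.1 : Int) > n / 2) := by
      constructor
      · intro h
        rcases hfm_mem with ⟨a, hal, hae⟩
        by_cases hac : a = s.1
        · rw [← hac, ← hae]; exact h
        · exfalso
          have := hx a hac
          simp at this
          rw [hae] at h
          omega
      · intro h
        have hm : s.1 ∈ l := by
          by_contra hnm
          rw [List.count_eq_zero_of_not_mem hnm] at h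
          simp at h
          omega
        exact lt_of_lt_of_le h (hfm_ge s.1 hm)
    by_cases hgt : findMaxA counting > n / 2
    · simp [hgt, key.mp hgt]
    · have : ¬ ((l.count s.1 : Int) > n / 2) := fun h => hgt (key.mpr h)
      simp [hgt, this]
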